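-- pv_equiv track=rewrite | github.com/ShuhangGe/DataAgent | src/agents/manager_agent.py | _extract_grouping
-- ===== SOURCE A (Python) =====
-- from typing import Dict, List, Any, Optional
--
-- def _extract_grouping(question: str) -> List[str]:
--     """Extract GROUP BY requirements from question"""
--     grouping = []
--
--     if any(word in question for word in ["by day", "daily", "per day"]):
--         grouping.append("date")
--     elif any(word in question for word in ["by week", "weekly", "per week"]):
--         grouping.append("week")
--     elif any(word in question for word in ["by month", "monthly", "per month"]):
--         grouping.append("month")
--
--     if any(word in question for word in ["by country", "per country"]):
--         grouping.append("country")
--     elif any(word in question for word in ["by device", "per device"]):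
--         grouping.append("device_type")
--     elif any(word in question for word in ["by platform", "per platform"]):
--         grouping.append("platform")
--
--     return grouping
-- ===== SOURCE B (Python) =====
-- from typing import Dict, List, Any, Optional
--
-- # Flat keyword table, one row per keyword, in alphabetical order:
-- # (keyword, group index, priority within group, label).  A single pass keeps,
-- # per group, the best (lowest-priority-number) match seen so far.
-- _KEYWORDS = [
--     ("by country", 1, 0, "country"),
--     ("by day", 0, 0, "date"),
--     ("by device", 1, 1, "device_type"),
--     ("by month", 0, 2, "month"),
--     ("by platform", 1, 2, "platform"),
--     ("by week", 0, 1, "week"),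
--     ("daily", 0, 0, "date"),
--     ("monthly", 0, 2, "month"),
--     ("per country", 1, 0, "country"),
--     ("per day", 0, 0, "date"),
--     ("per device", 1, 1, "device_type"),
--     ("per month", 0, 2, "month"),
--     ("per platform", 1, 2, "platform"),
--     ("per week", 0, 1, "week"),
--     ("weekly", 0, 1, "week"),
-- ]
--
-- def _extract_grouping(question: str) -> List[str]:
--     """Extract GROUP BY requirements from question (single-pass best-match version)"""
--     best = [None, None]
--     for kw, grp, prio, label in _KEYWORDS:
--         if kw in question and (best[grp] is None or prio < best[grp][0]):
--             best[grp] = (prio, label)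
--     return [b[1] for b in best if b is not None]
-- ===== Notes on version B (the rewrite author's own statement) =====
-- stated objective: alternative
-- what changed: Replaces the two if/elif chains (each testing whole keyword groups in priority order) by a single flat pass over an alphabetical keyword table that maintains, per group, the lowest-priority match seen so far, then emits the two best labels.
import Mathlib
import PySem

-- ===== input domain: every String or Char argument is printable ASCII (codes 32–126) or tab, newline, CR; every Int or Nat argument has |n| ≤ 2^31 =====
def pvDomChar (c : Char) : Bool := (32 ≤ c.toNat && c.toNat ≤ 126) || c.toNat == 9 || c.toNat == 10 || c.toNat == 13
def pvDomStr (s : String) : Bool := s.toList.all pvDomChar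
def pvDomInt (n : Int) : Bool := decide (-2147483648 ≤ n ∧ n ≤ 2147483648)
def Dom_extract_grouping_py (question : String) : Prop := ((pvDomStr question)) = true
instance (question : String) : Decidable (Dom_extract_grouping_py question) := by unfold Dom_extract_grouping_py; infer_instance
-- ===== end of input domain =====

-- B replaces the two if/elif chains by a single flat pass over an alphabetical keyword table
-- keeping the best (lowest-priority) match per group; same values everywhere (alternative).

-- ===== PORT A =====
def extract_grouping_py (question : String) : List String :=
  let grouping : List String := []
  let grouping :=
    if (["by day", "daily", "per day"].any (fun w => PySem.Str.isIn w question)) then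
      grouping ++ ["date"]
    else if (["by week", "weekly", "per week"].any (fun w => PySem.Str.isIn w question)) then
      grouping ++ ["week"]
    else if (["by month", "monthly", "per month"].any (fun w => PySem.Str.isIn w question)) then
      grouping ++ ["month"]
    else grouping
  let grouping :=
    if (["by country", "per country"].any (fun w => PySem.Str.isIn w question)) then
      grouping ++ ["country"]
    else if (["by device", "per device"].any (fun w => PySem.Str.isIn w question)) then
      grouping ++ ["device_type"]
    else if (["by platform", "per platform"].any (fun w => PySem.Str.isIn w question)) then
      grouping ++ ["platform"]
    else grouping
  grouping

-- ===== PORT B =====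
-- flat keyword table: (keyword, group index, priority within group, label), alphabetical
def pvKeywordTable : List (String × Nat × Nat × String) :=
  [ ("by country", 1, 0, "country"),
    ("by day", 0, 0, "date"),
    ("by device", 1, 1, "device_type"),
    ("by month", 0, 2, "month"),
    ("by platform", 1, 2, "platform"),
    ("by week", 0, 1, "week"),
    ("daily", 0, 0, "date"),
    ("monthly", 0, 2, "month"),
    ("per country", 1, 0, "country"),
    ("per day", 0, 0, "date"),
    ("per device", 1, 1, "device_type"),
    ("per month", 0, 2, "month"),
    ("per platform", 1, 2, "platform"),
    ("per week", 0, 1, "week"),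
    ("weekly", 0, 1, "week") ]

-- one table row applied to the running per-group best state (Source B's loop body)
def pvStep (question : String)
    (best : Option (Nat × String) × Option (Nat × String))
    (e : String × Nat × Nat × String) :
    Option (Nat × String) × Option (Nat × String) :=
  let (kw, grp, prio, label) := e
  let cur := if grp == 0 then best.1 else best.2
  let better : Bool := match cur with
    | none => true
    | some (p, _) => decide (prio < p)
  if PySem.Str.isIn kw question && better then
    if grp == 0 then (some (prio, label), best.2) else (best.1, some (prio, label))
  else best

def extract_grouping_py_alt (question : String) : List String :=
  let best := pvKeywordTable.foldl (pvStep question) (none, none)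
  (match best.1 with | some b => [b.2] | none => []) ++
  (match best.2 with | some b => [b.2] | none => [])

-- ===== PRECONDITION & SPEC =====
def Spec_extract_grouping_py (question : String) (out : List String) : Prop := out = extract_grouping_py_alt question
instance (question : String) (out : List String) : Decidable (Spec_extract_grouping_py question out) := by unfold Spec_extract_grouping_py; infer_instance

-- ===== CLAIM (what is proved, stated in full; the proofs are below) =====
def Claim_equal_extract_grouping_py : Prop := ∀ (question : String), Dom_extract_grouping_py question → Spec_extract_grouping_py question (extract_grouping_py question)

-- ===== LEMMAS AND PROOFS =====

-- A's body with each keyword-containment test abstracted to a Bool (definitional copy)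
def pvACore (bD dD pD bW wW pW bM mM pM bC pC bV pV bP pP : Bool) : List String :=
  let grouping : List String := []
  let grouping :=
    if ([bD, dD, pD].any id) then grouping ++ ["date"]
    else if ([bW, wW, pW].any id) then grouping ++ ["week"]
    else if ([bM, mM, pM].any id) then grouping ++ ["month"]
    else grouping
  let grouping :=
    if ([bC, pC].any id) then grouping ++ ["country"]
    else if ([bV, pV].any id) then grouping ++ ["device_type"]
    else if ([bP, pP].any id) then grouping ++ ["platform"]
    else grouping
  grouping

-- B's body with each keyword-containment test abstracted to a Bool (same fold, boolean table)
def pvBStep (best : Option (Nat × String) × Option (Nat × String))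
    (e : Bool × Nat × Nat × String) :
    Option (Nat × String) × Option (Nat × String) :=
  let (hit, grp, prio, label) := e
  let cur := if grp == 0 then best.1 else best.2
  let better : Bool := match cur with
    | none => true
    | some (p, _) => decide (prio < p)
  if hit && better then
    if grp == 0 then (some (prio, label), best.2) else (best.1, some (prio, label))
  else best

def pvBCore (bD dD pD bW wW pW bM mM pM bC pC bV pV bP pP : Bool) : List String :=
  let best := [ (bC, (1, 0, "country")), (bD, (0, 0, "date")),
    (bV, (1, 1, "device_type")), (bM, (0, 2, "month")),
    (bP, (1, 2, "platform")), (bW, (0, 1, "week")),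
    (dD, (0, 0, "date")), (mM, (0, 2, "month")),
    (pC, (1, 0, "country")), (pD, (0, 0, "date")),
    (pV, (1, 1, "device_type")), (pM, (0, 2, "month")),
    (pP, (1, 2, "platform")), (pW, (0, 1, "week")),
    (wW, (0, 1, "week")) ].foldl pvBStep (none, none)
  (match best.1 with | some b => [b.2] | none => []) ++
  (match best.2 with | some b => [b.2] | none => [])

-- one boolean table row applied to a single group's best state
def pvBStep1 (cur : Option (Nat × String)) (e : Bool × Nat × Nat × String) :
    Option (Nat × String) :=
  let (hit, _, prio, label) := e
  let better : Bool := match cur with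
    | none => true
    | some (p, _) => decide (prio < p)
  if hit && better then some (prio, label) else cur

theorem pvBStep_eq (s : Option (Nat × String) × Option (Nat × String))
    (e : Bool × Nat × Nat × String) :
    pvBStep s e = if e.2.1 == 0 then (pvBStep1 s.1 e, s.2) else (s.1, pvBStep1 s.2 e) := by
  obtain ⟨hit, grp, prio, label⟩ := e
  obtain ⟨s1, s2⟩ := s
  by_cases hg : grp = 0
  · subst hg
    simp only [pvBStep, pvBStep1]
    simp only [show ((0 : Nat) == 0) = true from rfl, if_true]
    split <;> split <;> rfl
  · have hg' : (grp == 0) = false := by simpa using hg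
    simp only [pvBStep, pvBStep1, hg']
    simp only [Bool.false_eq_true, if_false]
    split <;> split <;> rfl

-- the pair-state fold splits into one fold per group
theorem pvFold_split (l : List (Bool × Nat × Nat × String))
    (s : Option (Nat × String) × Option (Nat × String)) :
    l.foldl pvBStep s
      = ((l.filter (fun e => e.2.1 == 0)).foldl pvBStep1 s.1,
         (l.filter (fun e => !(e.2.1 == 0))).foldl pvBStep1 s.2) := by
  induction l generalizing s with
  | nil => rfl
  | cons e t ih =>
      simp only [List.foldl_cons, List.filter_cons, pvBStep_eq]
      cases h : (e.2.1 == 0)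
      · simp [ih]
      · simp [ih]

-- A's if/elif chain is the append of its two group chains
theorem pvACore_append (bD dD pD bW wW pW bM mM pM bC pC bV pV bP pP : Bool) :
    pvACore bD dD pD bW wW pW bM mM pM bC pC bV pV bP pP
      = ((if ([bD, dD, pD].any id) then (["date"] : List String)
          else if ([bW, wW, pW].any id) then ["week"]
          else if ([bM, mM, pM].any id) then ["month"]
          else []) ++
         (if ([bC, pC].any id) then (["country"] : List String)
          else if ([bV, pV].any id) then ["device_type"]
          else if ([bP, pP].any id) then ["platform"]
          else [])) := by
  unfold pvACore
  split_ifs <;> rfl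

theorem pvCore1 (bD dD pD bW wW pW bM mM pM : Bool) :
    (if ([bD, dD, pD].any id) then (["date"] : List String)
     else if ([bW, wW, pW].any id) then ["week"]
     else if ([bM, mM, pM].any id) then ["month"]
     else [])
      = (match ([ (bD, ((0:Nat), (0:Nat), "date")), (bM, (0, 2, "month")),
            (bW, (0, 1, "week")), (dD, (0, 0, "date")), (mM, (0, 2, "month")),
            (pD, (0, 0, "date")), (pM, (0, 2, "month")), (pW, (0, 1, "week")),
            (wW, (0, 1, "week")) ].foldl pvBStep1 none) with
         | some b => [b.2] | none => []) := by
  revert bD dD pD bW wW pW bM mM pM; decide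

theorem pvCore2 (bC pC bV pV bP pP : Bool) :
    (if ([bC, pC].any id) then (["country"] : List String)
     else if ([bV, pV].any id) then ["device_type"]
     else if ([bP, pP].any id) then ["platform"]
     else [])
      = (match ([ (bC, ((1:Nat), (0:Nat), "country")), (bV, (1, 1, "device_type")),
            (bP, (1, 2, "platform")), (pC, (1, 0, "country")),
            (pV, (1, 1, "device_type")), (pP, (1, 2, "platform")) ].foldl pvBStep1 none) with
         | some b => [b.2] | none => []) := by
  revert bC pC bV pV bP pP; decide

theorem pvCore_eq (bD dD pD bW wW pW bM mM pM bC pC bV pV bP pP : Bool) :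
    pvACore bD dD pD bW wW pW bM mM pM bC pC bV pV bP pP
      = pvBCore bD dD pD bW wW pW bM mM pM bC pC bV pV bP pP := by
  unfold pvBCore
  rw [pvFold_split, pvACore_append]
  exact congrArg₂ (· ++ ·) (pvCore1 bD dD pD bW wW pW bM mM pM) (pvCore2 bC pC bV pV bP pP)

theorem pvA_eq_core (q : String) :
    extract_grouping_py q
      = pvACore (PySem.Str.isIn "by day" q) (PySem.Str.isIn "daily" q) (PySem.Str.isIn "per day" q)
          (PySem.Str.isIn "by week" q) (PySem.Str.isIn "weekly" q) (PySem.Str.isIn "per week" q)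
          (PySem.Str.isIn "by month" q) (PySem.Str.isIn "monthly" q) (PySem.Str.isIn "per month" q)
          (PySem.Str.isIn "by country" q) (PySem.Str.isIn "per country" q)
          (PySem.Str.isIn "by device" q) (PySem.Str.isIn "per device" q)
          (PySem.Str.isIn "by platform" q) (PySem.Str.isIn "per platform" q) := rfl

theorem pvB_eq_core (q : String) :
    extract_grouping_py_alt q
      = pvBCore (PySem.Str.isIn "by day" q) (PySem.Str.isIn "daily" q) (PySem.Str.isIn "per day" q)
          (PySem.Str.isIn "by week" q) (PySem.Str.isIn "weekly" q) (PySem.Str.isIn "per week" q)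
          (PySem.Str.isIn "by month" q) (PySem.Str.isIn "monthly" q) (PySem.Str.isIn "per month" q)
          (PySem.Str.isIn "by country" q) (PySem.Str.isIn "per country" q)
          (PySem.Str.isIn "by device" q) (PySem.Str.isIn "per device" q)
          (PySem.Str.isIn "by platform" q) (PySem.Str.isIn "per platform" q) := rfl

-- ===== VERDICT (by name: the statement is the Claim_ definition above) =====
theorem extract_grouping_py_spec : Claim_equal_extract_grouping_py := by
  intro q _
  unfold Spec_extract_grouping_py
  rw [pvA_eq_core, pvB_eq_core, pvCore_eq]
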